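-- pv_equiv track=rewrite | github.com/chrysante/Prism | src/Prism/Common/Filters.py | build_inheritance_tree
-- ===== SOURCE A (Python) =====
-- def build_inheritance_tree(facets):
--     name_to_facet = {facet['name']: facet for facet in facets}
--     tree = {}
--     root = None
--     for facet in facets:
--         base_class = facet.get('base', None)
--         if base_class:
--             if base_class not in tree:
--                 tree[base_class] = []
--             tree[base_class].append(facet['name'])
--         else:
--             if facet['name'] not in tree:
--                 tree[facet['name']] = []
--             root = facet
--
--     def render_tree(class_name, depth=0, is_last=True, prefix=''):
--         result = '// '
--         if depth > 0:
--             result += prefix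
--             if is_last:
--                 result += '╰╴'
--             else:
--                 result += '├╴'
--         result += class_name + '\n'
--         if class_name in tree:
--             children = tree[class_name]
--             new_prefix = '' if depth == 0 else prefix + ('│ ' if not is_last else '  ')
--             for i, child in enumerate(children):
--                 is_last = (i == len(children) - 1)
--                 result += render_tree(child, depth + 1, is_last=is_last, prefix=new_prefix)
--         return result
--
--     return render_tree(root.get('name', None))
-- ===== SOURCE B (Python) =====
-- def build_inheritance_tree(facets):
--     # Iterative re-decomposition: no dicts at all.  The root name is the last
--     # base-less facet's name; the recursive renderer is replaced by an explicit
--     # stack of (name, lead, child_lead) frames popped in pre-order; a node's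
--     # children are taken from a shrinking 'pending' list of based facets and
--     # consumed when their parent is emitted; lines are joined once at the end.
--     root_name = None
--     for f in facets:
--         if not f.get('base'):
--             root_name = f['name']
--     pending = [f for f in facets if f.get('base')]
--     lines = []
--     stack = [(root_name, '', '')]
--     while stack:
--         name, lead, child_lead = stack.pop()
--         lines.append('// ' + lead + name + '\n')
--         kids = [f['name'] for f in pending if f['base'] == name]
--         pending = [f for f in pending if f['base'] != name]
--         for i in range(len(kids) - 1, -1, -1):
--             last = i == len(kids) - 1
--             stack.append((kids[i], child_lead + ('╰╴' if last else '├╴'),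
--                           child_lead + ('  ' if last else '│ ')))
--     return ''.join(lines)
-- ===== Notes on version B (the rewrite author's own statement) =====
-- stated objective: alternative
-- what changed: B is dict-free and iterative: the recursive render_tree is replaced by an explicit stack of (name, lead, child_lead) frames popped in pre-order, a node's children are taken from a shrinking pending list of based facets that is consumed as parents are emitted (instead of A's prebuilt tree dict), and lines are collected in a list and joined once.
import Mathlib
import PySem

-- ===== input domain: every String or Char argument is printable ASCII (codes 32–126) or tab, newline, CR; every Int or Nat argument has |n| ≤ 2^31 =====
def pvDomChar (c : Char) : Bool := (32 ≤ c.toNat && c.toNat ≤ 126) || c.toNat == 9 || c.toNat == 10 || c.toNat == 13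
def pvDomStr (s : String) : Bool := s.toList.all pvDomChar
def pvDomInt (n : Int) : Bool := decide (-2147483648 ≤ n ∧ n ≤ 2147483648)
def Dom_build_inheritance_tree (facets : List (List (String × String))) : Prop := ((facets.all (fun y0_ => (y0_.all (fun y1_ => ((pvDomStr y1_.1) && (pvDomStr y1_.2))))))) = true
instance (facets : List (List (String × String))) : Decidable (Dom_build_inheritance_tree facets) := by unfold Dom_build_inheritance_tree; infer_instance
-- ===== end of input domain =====

-- B is dict-free and iterative: an explicit stack of (name, lead, child_lead) frames replaces
-- the recursive render, and children come from a shrinking pending list of based facets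
-- (objective: alternative decomposition, not claimed faster).

-- ===== PORT A =====
-- facet['name'] (getD "" is only reached where Python would raise KeyError, excluded by Pre_)
def pvName (f : List (String × String)) : String :=
  ((PySem.Dict.mk f).get? "name").getD ""

-- facet.get('base', None); None and '' are both falsy, so they are merged to ""
def pvBase (f : List (String × String)) : String :=
  ((PySem.Dict.mk f).get? "base").getD ""

-- one iteration of A's first loop over the state (tree, root)
def buildTreeStep (st : PySem.Dict String (List String) × Option (List (String × String)))
    (f : List (String × String)) :
    PySem.Dict String (List String) × Option (List (String × String)) :=
  let tree := st.1
  if pvBase f ≠ "" then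
    -- if base not in tree: tree[base] = []; tree[base].append(name)
    (tree.insert (pvBase f) (tree.getD (pvBase f) [] ++ [pvName f]), st.2)
  else
    ((if tree.contains (pvName f) then tree else tree.insert (pvName f) []), some f)

-- render_tree, recursion bounded by fuel (Python's recursion depth ≤ facets.length under Pre_)
def renderA (tree : PySem.Dict String (List String)) :
    Nat → String → Nat → Bool → String → String
  | 0, _, _, _, _ => ""  -- fuel exhaustion, unreachable under Pre_
  | fu+1, class_name, depth, is_last, pre =>
    let result := "// "
    let result := if depth > 0 then result ++ pre ++ (if is_last then "╰╴" else "├╴") else result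
    let result := result ++ class_name ++ "\n"
    match tree.get? class_name with
    | none => result
    | some children =>
      let new_prefix := if depth = 0 then "" else pre ++ (if is_last then "  " else "│ ")
      (PySem.List.enumerate children).foldl
        (fun acc ic =>
          acc ++ renderA tree fu ic.2 (depth + 1) (ic.1 == (children.length : Int) - 1) new_prefix)
        result

def build_inheritance_tree (facets : List (List (String × String))) : String :=
  let _name_to_facet :=  -- built by A and never used
    facets.foldl (fun d f => d.insert (pvName f) f)
      (PySem.Dict.empty : PySem.Dict String (List (String × String)))
  let st := facets.foldl buildTreeStep (PySem.Dict.empty, none)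
  match st.2 with
  | none => ""  -- Python raises AttributeError (root is None); excluded by Pre_
  | some root => renderA st.1 (facets.length + 1) (pvName root) 0 true ""  -- root.get('name', None)

-- ===== PORT B =====
-- kids = [f['name'] for f in pending if f['base'] == name]
def kidsOf (pending : List (List (String × String))) (name : String) : List String :=
  pending.filterMap (fun f => if pvBase f == name then some (pvName f) else none)

-- pending = [f for f in pending if f['base'] != name]
def dropKids (pending : List (List (String × String))) (name : String) :
    List (List (String × String)) :=
  pending.filter (fun f => pvBase f != name)

-- termination fact for B's while loop: consumed kids plus the remaining pending split pending
theorem len_kids_split (pending : List (List (String × String))) (name : String) :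
    (kidsOf pending name).length + (dropKids pending name).length = pending.length := by
  unfold kidsOf dropKids
  induction pending with
  | nil => simp
  | cons f rest ih =>
    simp only [bne, List.filterMap_cons, List.filter_cons] at ih ⊢
    cases h : pvBase f == name <;> simp [h] at ih ⊢ <;> omega

-- the while loop over the stack; Python's stack has its top at the list's end and children are
-- pushed in reverse, so with the top at the head the new stack is (frames of kids) ++ rest
def loopB : List (List (String × String)) → List (String × String × String) → List String → List String
  | _, [], lines => lines
  | pending, (name, lead, clead) :: rest, lines =>
    let kids := kidsOf pending name
    loopB (dropKids pending name)
      ((PySem.List.enumerate kids).map (fun ik =>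
        (ik.2, clead ++ (if ik.1 == (kids.length : Int) - 1 then "╰╴" else "├╴"),
               clead ++ (if ik.1 == (kids.length : Int) - 1 then "  " else "│ "))) ++ rest)
      (lines ++ ["// " ++ lead ++ name ++ "\n"])
termination_by pending frames _ => pending.length + frames.length
decreasing_by
  have := len_kids_split pending name
  simp only [List.length_append, List.length_map, PySem.List.length_enumerate, List.length_cons]
  omega

def build_inheritance_tree_alt (facets : List (List (String × String))) : String :=
  let root_name := facets.foldl
    (fun acc f => if pvBase f == "" then some (pvName f) else acc)
    (none : Option String)
  match root_name with
  | none => ""  -- Python raises TypeError ('// ' + '' + None); excluded by Pre_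
  | some rn =>
    PySem.Str.join "" (loopB (facets.filter (fun f => pvBase f ≠ "")) [(rn, "", "")] [])

-- ===== PRECONDITION & SPEC =====
-- Pre_ excludes exactly: a facet without a 'name' key (A raises KeyError), no facet with a falsy
-- base (A raises AttributeError on root=None), and a class name carried by more than one facet
-- with a truthy base or by both a truthy-base and a base-less facet: there A can recurse forever
-- (RecursionError on a base cycle) or, where it returns, duplicates whole subtrees — an accident
-- of its tree dict on malformed (duplicate-name) input that B, consuming each facet once, does
-- not reproduce.
def Pre_build_inheritance_tree (facets : List (List (String × String))) : Prop :=
  (∀ f ∈ facets, ((PySem.Dict.mk f).get? "name").isSome = true) ∧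
  (∃ f ∈ facets, pvBase f = "") ∧
  ((facets.filter (fun f => pvBase f ≠ "")).map pvName).Nodup ∧
  (∀ f ∈ facets, pvBase f ≠ "" → ∀ g ∈ facets, pvBase g = "" → pvName f ≠ pvName g)
instance (facets : List (List (String × String))) : Decidable (Pre_build_inheritance_tree facets) := by
  unfold Pre_build_inheritance_tree; infer_instance

def pvWitness_build_inheritance_tree : (List (List (String × String))) :=
  [[("name", "Base")], [("name", "Kid"), ("base", "Base")]]

def Spec_build_inheritance_tree (facets : List (List (String × String))) (out : String) : Prop := out = build_inheritance_tree_alt facets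
instance (facets : List (List (String × String))) (out : String) : Decidable (Spec_build_inheritance_tree facets out) := by unfold Spec_build_inheritance_tree; infer_instance

-- ===== CLAIM (what is proved, stated in full; the proofs are below) =====
def Claim_equal_build_inheritance_tree : Prop := ∀ (facets : List (List (String × String))), Dom_build_inheritance_tree facets → Pre_build_inheritance_tree facets → Spec_build_inheritance_tree facets (build_inheritance_tree facets)

-- ===== LEMMAS AND PROOFS =====

-- each line followed by '\n', concatenated: the shape of A's result
def joinLines : List String → String
  | [] => ""
  | l :: ls => (l ++ "\n") ++ joinLines ls

theorem joinLines_append (a b : List String) :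
    joinLines (a ++ b) = joinLines a ++ joinLines b := by
  induction a with
  | nil => simp [joinLines]
  | cons l ls ih => simp [joinLines, ih, String.append_assoc]

-- ''.join of newline-terminated lines is joinLines
theorem toList_join_empty (ls : List String) :
    PySem.Chars.join [] ((ls.map (· ++ "\n")).map String.toList) = (joinLines ls).toList := by
  induction ls with
  | nil => simp [PySem.Chars.join, joinLines, List.intercalate]
  | cons l ms ih =>
    cases ms with
    | nil => simp [PySem.Chars.join_singleton, joinLines, String.toList_append]
    | cons m mss =>
      simp only [List.map_cons] at ih ⊢
      rw [PySem.Chars.join_cons_cons, ih]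
      simp [joinLines, String.toList_append]

theorem join_empty_eq_joinLines (ls : List String) :
    PySem.Str.join "" (ls.map (· ++ "\n")) = joinLines ls := by
  apply String.toList_inj.mp
  rw [PySem.Str.toList_join]
  simpa using toList_join_empty ls

-- global children of a name: [f['name'] for f in facets if f.get('base') and f['base'] == name]
def pvKids (facets : List (List (String × String))) (name : String) : List String :=
  facets.filterMap (fun f => if pvBase f ≠ "" && pvBase f == name then some (pvName f) else none)

-- one step of the children filter
theorem pvKids_cons (f : List (String × String)) (rest : List (List (String × String))) (k : String) :
    pvKids (f :: rest) k
      = (if pvBase f ≠ "" && pvBase f == k then [pvName f] else []) ++ pvKids rest k := by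
  by_cases hc : (¬pvBase f = "" ∧ pvBase f = k)
  · have hk0 : ¬ k = "" := hc.2 ▸ hc.1
    simp [pvKids, hc.2, hk0]
  · simp [pvKids, hc]

-- the tree built by A's first loop holds, at every key, exactly the global children
theorem tree_getD_eq_pvKids (facets : List (List (String × String)))
    (tree0 : PySem.Dict String (List String)) (r0 : Option (List (String × String))) (k : String) :
    ((facets.foldl buildTreeStep (tree0, r0)).1).getD k []
      = tree0.getD k [] ++ pvKids facets k := by
  induction facets generalizing tree0 r0 with
  | nil => simp [pvKids]
  | cons f rest ih =>
    simp only [List.foldl_cons, pvKids_cons]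
    by_cases hb : pvBase f = ""
    · have hstep : buildTreeStep (tree0, r0) f
          = ((if tree0.contains (pvName f) then tree0 else tree0.insert (pvName f) []), some f) := by
        simp [buildTreeStep, hb]
      rw [hstep, ih]
      have hsame : (if tree0.contains (pvName f) then tree0
          else tree0.insert (pvName f) []).getD k [] = tree0.getD k [] := by
        split
        · rfl
        · next hc =>
          rw [PySem.Dict.getD_insert]
          split
          · next hk =>
            subst hk
            exact (PySem.Dict.getD_of_not_contains _ _ (by simpa using hc)).symm
          · rfl
      rw [hsame]
      simp [hb]
    · have hstep : buildTreeStep (tree0, r0) f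
          = (tree0.insert (pvBase f) (tree0.getD (pvBase f) [] ++ [pvName f]), r0) := by
        simp [buildTreeStep, hb]
      rw [hstep, ih, PySem.Dict.getD_insert]
      by_cases hk : k = pvBase f
      · rw [if_pos hk]
        have : (pvBase f ≠ "" && pvBase f == k) = true := by
          simp [hk.symm]; rw [hk]; exact hb
        rw [this]
        simp [hk, List.append_assoc]
      · rw [if_neg hk]
        have : (pvBase f ≠ "" && pvBase f == k) = false := by
          simp [hb]; exact fun h => (hk h.symm).elim
        rw [this]
        simp

-- A's root is the last facet with a falsy base
theorem root_eq_reverse_find (facets : List (List (String × String)))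
    (tree0 : PySem.Dict String (List String)) (r0 : Option (List (String × String))) :
    (facets.foldl buildTreeStep (tree0, r0)).2
      = (facets.reverse.find? (fun f => pvBase f == "")).or r0 := by
  induction facets generalizing tree0 r0 with
  | nil => simp
  | cons f rest ih =>
    simp only [List.foldl_cons, List.reverse_cons, List.find?_append, Option.or_assoc]
    rw [ih]
    by_cases hb : pvBase f = ""
    · have h2 : (buildTreeStep (tree0, r0) f).2 = some f := by simp [buildTreeStep, hb]
      rw [h2]
      simp [hb]
    · have h2 : (buildTreeStep (tree0, r0) f).2 = r0 := by simp [buildTreeStep, hb]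
      rw [h2]
      simp [hb]

-- B's root_name loop also keeps the last facet with a falsy base
theorem rootB_eq_reverse_find (facets : List (List (String × String))) (init : Option String) :
    facets.foldl (fun acc f => if pvBase f == "" then some (pvName f) else acc) init
      = (facets.reverse.find? (fun f => pvBase f == "")).elim init (fun r => some (pvName r)) := by
  induction facets generalizing init with
  | nil => simp
  | cons f rest ih =>
    simp only [List.foldl_cons, List.reverse_cons, List.find?_append]
    rw [ih]
    cases hx : rest.reverse.find? (fun f => pvBase f == "") with
    | some r => simp
    | none =>
      by_cases hb : pvBase f = "" <;> simp [hb]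

-- proof-side recursive renderer with per-level fuel, matching renderA in lockstep
def renderRec (facets : List (List (String × String))) :
    Nat → String → String → String → List String
  | 0, _, _, _ => []
  | fu+1, name, lead, clead =>
    let kids := pvKids facets name
    (PySem.List.enumerate kids).foldl
      (fun out ik =>
        let last := ik.1 == (kids.length : Int) - 1
        out ++ renderRec facets fu ik.2
          (clead ++ (if last then "╰╴" else "├╴"))
          (clead ++ (if last then "  " else "│ ")))
      ["// " ++ lead ++ name]

-- fold the two renderings in lockstep
theorem fold_pair {α : Type} (gA : α → String) (gB : α → List String)
    (l : List α) (h : ∀ p ∈ l, gA p = joinLines (gB p)) :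
    ∀ (sB : List String),
      l.foldl (fun a p => a ++ gA p) (joinLines sB)
        = joinLines (l.foldl (fun a p => a ++ gB p) sB) := by
  induction l with
  | nil => intro sB; simp
  | cons p rest ih =>
    intro sB
    simp only [List.foldl_cons]
    rw [h p (by simp), ← joinLines_append]
    exact ih (fun q hq => h q (by simp [hq])) _

theorem renderA_eq_renderRec (facets : List (List (String × String)))
    (tree : PySem.Dict String (List String))
    (H : ∀ k, tree.getD k [] = pvKids facets k) :
    ∀ (fu : Nat) (d : Nat) (name : String) (is_last : Bool) (pre lead clead : String),
      lead = pre ++ (if is_last then "╰╴" else "├╴") →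
      clead = pre ++ (if is_last then "  " else "│ ") →
      renderA tree fu name (d + 1) is_last pre = joinLines (renderRec facets fu name lead clead) := by
  intro fu
  induction fu with
  | zero =>
    intro d name is_last pre lead clead _ _
    simp [renderA, renderRec, joinLines]
  | succ fu ih =>
    intro d name is_last pre lead clead hl hc
    subst hl hc
    simp only [renderA, renderRec]
    cases hg : tree.get? name with
    | none =>
      have hk : pvKids facets name = [] := by
        rw [← H name]; exact PySem.Dict.getD_of_get?_eq_none tree [] hg
      rw [hk]
      simp [PySem.List.enumerate, joinLines, String.append_assoc]
    | some children =>
      have hch : pvKids facets name = children := by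
        rw [← H name]; exact PySem.Dict.getD_of_get?_eq_some tree [] hg
      rw [hch]
      have hbase :
          (if d + 1 > 0 then "// " ++ pre ++ (if is_last then "╰╴" else "├╴") else "// ")
              ++ name ++ "\n"
            = joinLines ["// " ++ (pre ++ (if is_last then "╰╴" else "├╴")) ++ name] := by
        simp [joinLines, String.append_assoc]
      rw [hbase]
      have hnp : (if d + 1 = 0 then ""
          else pre ++ (if is_last then "  " else "│ "))
            = pre ++ (if is_last then "  " else "│ ") := by simp
      rw [hnp]
      exact fold_pair
        (fun ic => renderA tree fu ic.2 (d + 1 + 1)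
          (ic.1 == (children.length : Int) - 1) (pre ++ (if is_last then "  " else "│ ")))
        (fun ik => renderRec facets fu ik.2
          ((pre ++ (if is_last then "  " else "│ ")) ++
            (if ik.1 == (children.length : Int) - 1 then "╰╴" else "├╴"))
          ((pre ++ (if is_last then "  " else "│ ")) ++
            (if ik.1 == (children.length : Int) - 1 then "  " else "│ ")))
        (PySem.List.enumerate children)
        (fun p _ => ih (d + 1) p.2 (p.1 == (children.length : Int) - 1)
          (pre ++ (if is_last then "  " else "│ ")) _ _ rfl rfl)
        ["// " ++ (pre ++ (if is_last then "╰╴" else "├╴")) ++ name]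

theorem renderA_eq_renderRec_root (facets : List (List (String × String)))
    (tree : PySem.Dict String (List String))
    (H : ∀ k, tree.getD k [] = pvKids facets k) (fu : Nat) (name : String) :
    renderA tree fu name 0 true "" = joinLines (renderRec facets fu name "" "") := by
  cases fu with
  | zero => simp [renderA, renderRec, joinLines]
  | succ fu =>
    cases hg : tree.get? name with
    | none =>
      simp only [renderA, renderRec, hg]
      have hk : pvKids facets name = [] := by
        rw [← H name]; exact PySem.Dict.getD_of_get?_eq_none tree [] hg
      rw [hk]
      simp [PySem.List.enumerate, joinLines, String.append_assoc]
    | some children =>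
      simp only [renderA, renderRec, hg]
      have hch : pvKids facets name = children := by
        rw [← H name]; exact PySem.Dict.getD_of_get?_eq_some tree [] hg
      rw [hch]
      rw [if_neg (by simp : ¬ ((0 : Nat) > 0))]
      rw [if_pos (by trivial : True)]
      have hbase : "// " ++ name ++ "\n" = joinLines ["// " ++ "" ++ name] := by
        simp [joinLines, String.append_assoc]
      rw [hbase]
      exact fold_pair
        (fun ic => renderA tree fu ic.2 (0 + 1)
          (ic.1 == (children.length : Int) - 1) "")
        (fun ik => renderRec facets fu ik.2
          ("" ++ (if ik.1 == (children.length : Int) - 1 then "╰╴" else "├╴"))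
          ("" ++ (if ik.1 == (children.length : Int) - 1 then "  " else "│ ")))
        (PySem.List.enumerate children)
        (fun p _ => renderA_eq_renderRec facets tree H fu 0 p.2
          (p.1 == (children.length : Int) - 1) "" _ _ rfl rfl)
        ["// " ++ "" ++ name]

-- ===== the bridge from renderRec to B's stack loop =====

-- the names of facets with a truthy base
def basedNames (facets : List (List (String × String))) : List String :=
  (facets.filter (fun f => pvBase f ≠ "")).map pvName

-- the pending list after the parents in 'done' have been expanded
def pendingOf (facets : List (List (String × String))) (done : List String) :
    List (List (String × String)) :=
  facets.filter (fun f => pvBase f ≠ "" && !(done.contains (pvBase f)))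

theorem pvKids_eq_map (facets : List (List (String × String))) (n : String) :
    pvKids facets n = (facets.filter (fun f => pvBase f ≠ "" && pvBase f == n)).map pvName := by
  induction facets with
  | nil => simp [pvKids]
  | cons f rest ih =>
    rw [pvKids_cons, ih, List.filter_cons]
    by_cases h1 : pvBase f = ""
    · simp [h1]
    · by_cases h2 : pvBase f = n
      · have hn0 : ¬ n = "" := h2 ▸ h1
        simp [h1, h2, hn0]
      · simp [h1, h2]

theorem mem_pvKids_based (facets : List (List (String × String))) (n k : String)
    (h : k ∈ pvKids facets n) : k ∈ basedNames facets := by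
  rw [pvKids_eq_map] at h
  obtain ⟨f, hf, hk⟩ := List.mem_map.mp h
  rw [List.mem_filter] at hf
  exact List.mem_map.mpr ⟨f, List.mem_filter.mpr ⟨hf.1, by
    have := hf.2; simp at this ⊢; exact this.1⟩, hk⟩

theorem parent_unique (facets : List (List (String × String)))
    (hnd : (basedNames facets).Nodup) (n m k : String)
    (hn : k ∈ pvKids facets n) (hm : k ∈ pvKids facets m) : n = m := by
  rw [pvKids_eq_map] at hn hm
  obtain ⟨f, hf, hkf⟩ := List.mem_map.mp hn
  obtain ⟨g, hg, hkg⟩ := List.mem_map.mp hm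
  rw [List.mem_filter] at hf hg
  have hf2 := hf.2; have hg2 := hg.2
  simp only [Bool.and_eq_true, bne_iff_ne, ne_eq, beq_iff_eq] at hf2 hg2
  have hfb : f ∈ facets.filter (fun f => pvBase f ≠ "") :=
    List.mem_filter.mpr ⟨hf.1, by simp [hf2.1]⟩
  have hgb : g ∈ facets.filter (fun f => pvBase f ≠ "") :=
    List.mem_filter.mpr ⟨hg.1, by simp [hg2.1]⟩
  have : f = g := List.inj_on_of_nodup_map hnd hfb hgb (hkf.trans hkg.symm)
  rw [← hf2.2, ← hg2.2, this]

theorem pvKids_nodup (facets : List (List (String × String)))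
    (hnd : (basedNames facets).Nodup) (n : String) : (pvKids facets n).Nodup := by
  rw [pvKids_eq_map]
  have hsub : (facets.filter (fun f => pvBase f ≠ "" && pvBase f == n)).Sublist
      (facets.filter (fun f => pvBase f ≠ "")) := by
    apply List.monotone_filter_right
    intro a h
    simp only [Bool.and_eq_true] at h
    exact h.1
  exact hnd.sublist (hsub.map pvName)

-- children taken from pending are the global children while the parent is unexpanded
theorem pending_kids_eq (facets : List (List (String × String))) (done : List String) (n : String)
    (hn : ¬ n ∈ done) :
    kidsOf (pendingOf facets done) n = pvKids facets n := by
  unfold kidsOf pendingOf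
  induction facets with
  | nil => simp [pvKids]
  | cons f rest ih =>
    rw [List.filter_cons, pvKids_cons]
    by_cases hb : pvBase f = ""
    · rw [if_neg (by simp [hb])]
      rw [ih]
      simp [hb]
    · by_cases hd : done.contains (pvBase f) = true
      · have hdm : pvBase f ∈ done := by simpa using hd
        rw [if_neg (by simp [hb, hdm])]
        rw [ih]
        have hne : ¬ pvBase f = n := fun h => hn (h ▸ hdm)
        simp [hb, hne]
      · have hdm : ¬ pvBase f ∈ done := by simpa using hd
        rw [if_pos (by simp [hb, hdm])]
        rw [List.filterMap_cons, ih]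
        by_cases hfn : pvBase f = n
        · have hn0 : ¬ n = "" := hfn ▸ hb
          simp [hfn, hb, hn0]
        · simp [hfn, hb]

-- removing a parent's children from pending is expanding that parent
theorem pending_step (facets : List (List (String × String))) (done : List String) (n : String) :
    dropKids (pendingOf facets done) n = pendingOf facets (done ++ [n]) := by
  simp only [dropKids, pendingOf, List.filter_filter]
  apply List.filter_congr
  intro f _
  by_cases h1 : pvBase f = "" <;> by_cases h2 : done.contains (pvBase f) <;>
    by_cases h3 : pvBase f = n <;> simp [h1, h2, h3, List.contains_append]

theorem pendingOf_le (facets : List (List (String × String))) (done : List String) (n : String) :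
    (pendingOf facets (done ++ [n])).length ≤ (pendingOf facets done).length := by
  rw [← pending_step]
  exact List.length_filter_le _ _

-- the main bridge: the stack loop emits the concatenation of the recursive renderings
theorem bridge (facets : List (List (String × String)))
    (hnd : (basedNames facets).Nodup) :
    ∀ (pending : List (List (String × String))) (frames : List (String × String × String))
      (lines : List String) (done : List String)
      (F : List (Nat × String × String × String)),
      pending = pendingOf facets done →
      frames = F.map (fun q => (q.2.1, q.2.2.1, q.2.2.2)) →
      (F.map (fun q => q.2.1)).Nodup →
      (∀ q ∈ F, ¬ q.2.1 ∈ done) →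
      (∀ n, (n ∈ done ∨ n ∈ F.map (fun q => q.2.1)) →
        (¬ n ∈ basedNames facets ∨ ∃ m ∈ done, n ∈ pvKids facets m)) →
      (∀ q ∈ F, pending.length < q.1) →
      loopB pending frames lines
        = lines ++ (F.flatMap
            (fun q => renderRec facets q.1 q.2.1 q.2.2.1 q.2.2.2)).map (· ++ "\n") := by
  intro pending frames lines
  induction pending, frames, lines using loopB.induct with
  | case1 pending lines =>
    intro done F hp hf _ _ _ _
    have : F = [] := by
      cases F with
      | nil => rfl
      | cons q F' => simp at hf
    subst this
    simp [loopB]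
  | case2 pending name lead clead rest lines kids ih =>
    intro done F hp hf hnod hdone hinv hfuel
    have hk0 : kids = kidsOf pending name := rfl
    obtain ⟨q, F', rfl⟩ : ∃ q F', F = q :: F' := by
      cases F with
      | nil => simp at hf
      | cons q F' => exact ⟨q, F', rfl⟩
    obtain ⟨fu, q3⟩ := q
    simp only [List.map_cons, List.cons.injEq] at hf
    obtain ⟨hq, hrest⟩ := hf
    have hq3 : q3 = (name, lead, clead) := by
      rcases q3 with ⟨a, b, c⟩
      simpa using hq.symm
    subst hq3
    have hnmem : ¬ name ∈ done := hdone (fu, name, lead, clead) (by simp)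
    have hkids : kidsOf pending name = pvKids facets name := by
      rw [hp]
      exact pending_kids_eq facets done name hnmem
    have hpend' : dropKids pending name = pendingOf facets (done ++ [name]) := by
      rw [hp]
      exact pending_step facets done name
    obtain ⟨m, rfl⟩ : ∃ m, fu = m + 1 := by
      have := hfuel (fu, name, lead, clead) (by simp)
      cases fu with
      | zero => omega
      | succ m => exact ⟨m, rfl⟩
    -- split of pending length
    have hsplit : (pvKids facets name).length + (pendingOf facets (done ++ [name])).length
        = (pendingOf facets done).length := by
      have := len_kids_split (pendingOf facets done) name
      rwa [pending_kids_eq facets done name hnmem, pending_step facets done name] at this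
    -- the invariant facts about new kids
    have hkidmem : ∀ k ∈ pvKids facets name, ¬ k ∈ done ∧ ¬ k ∈ (done ++ [name]) := by
      intro k hk
      have hkd : ¬ k ∈ done := by
        intro hkdone
        rcases hinv k (Or.inl hkdone) with h | ⟨p, hp', hkp⟩
        · exact h (mem_pvKids_based facets name k hk)
        · exact hnmem (parent_unique facets hnd p name k hkp hk ▸ hp')
      refine ⟨hkd, ?_⟩
      intro hmem
      rcases List.mem_append.mp hmem with h | h
      · exact hkd h
      · -- k = name: then name ∈ pvKids name, contradicting the invariant at name
        have hkn : k = name := by simpa using h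
        subst hkn
        rcases hinv k (Or.inr (by simp)) with h2 | ⟨p, hp', hkp⟩
        · exact h2 (mem_pvKids_based facets k k hk)
        · exact hnmem (parent_unique facets hnd p k k hkp hk ▸ hp')
    have hkid_not_rest : ∀ k ∈ pvKids facets name, ¬ k ∈ F'.map (fun q => q.2.1) := by
      intro k hk hkr
      rcases hinv k (Or.inr (by simp [hkr])) with h | ⟨p, hp', hkp⟩
      · exact h (mem_pvKids_based facets name k hk)
      · exact hnmem (parent_unique facets hnd p name k hkp hk ▸ hp')
    -- apply the IH
    have hIH := ih (done ++ [name])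
      ((PySem.List.enumerate (pvKids facets name)).map (fun ik =>
        (m, ik.2,
         clead ++ (if ik.1 == ((pvKids facets name).length : Int) - 1 then "╰╴" else "├╴"),
         clead ++ (if ik.1 == ((pvKids facets name).length : Int) - 1 then "  " else "│ "))) ++ F')
      hpend'
      (by
        simp only [hk0, hkids, hrest]
        simp [List.map_map, Function.comp_def, dite_eq_ite])
      (by
        -- nodup of kid names ++ rest names
        rw [List.map_append, List.map_map]
        have h1 : ((PySem.List.enumerate (pvKids facets name)).map
            ((fun q => q.2.1) ∘ (fun ik =>
              ((m : Nat), ik.2,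
               clead ++ (if ik.1 == ((pvKids facets name).length : Int) - 1 then "╰╴" else "├╴"),
               clead ++ (if ik.1 == ((pvKids facets name).length : Int) - 1 then "  " else "│ ")))))
            = pvKids facets name := by
          have := PySem.List.map_snd_enumerate (pvKids facets name) 0
          simpa [Function.comp_def] using this
        rw [h1]
        apply List.Nodup.append (pvKids_nodup facets hnd name) (by
          have := hnod
          simp only [List.map_cons] at this
          exact (List.nodup_cons.mp this).2)
        intro k hk1 hk2
        exact hkid_not_rest k hk1 hk2)
      (by
        intro q hq
        rcases List.mem_append.mp hq with h | h
        · obtain ⟨ik, hik, rfl⟩ := List.mem_map.mp h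
          have hkmem : ik.2 ∈ pvKids facets name := by
            have := PySem.List.map_snd_enumerate (pvKids facets name) 0
            rw [← this]
            exact List.mem_map.mpr ⟨ik, hik, rfl⟩
          exact (hkidmem _ hkmem).2
        · intro hmem
          rcases List.mem_append.mp hmem with h2 | h2
          · exact hdone q (by simp [h]) h2
          · have : q.2.1 = name := by simpa using h2
            have hnodup := hnod
            simp only [List.map_cons, List.nodup_cons] at hnodup
            exact hnodup.1 (this ▸ List.mem_map.mpr ⟨q, h, rfl⟩))
      (by
        intro n hn
        have mono : ∀ (x : String), (¬ x ∈ basedNames facets ∨ ∃ p ∈ done, x ∈ pvKids facets p) →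
            (¬ x ∈ basedNames facets ∨ ∃ p ∈ done ++ [name], x ∈ pvKids facets p) := by
          intro x hx
          rcases hx with h | ⟨p, hp', hxp⟩
          · exact Or.inl h
          · exact Or.inr ⟨p, by simp [hp'], hxp⟩
        rcases hn with h | h
        · rcases List.mem_append.mp h with h2 | h2
          · exact mono n (hinv n (Or.inl h2))
          · have : n = name := by simpa using h2
            subst this
            exact mono n (hinv n (Or.inr (by simp)))
        · rw [List.map_append, List.map_map] at h
          rcases List.mem_append.mp h with h2 | h2
          · -- a kid of name
            have hkmem : n ∈ pvKids facets name := by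
              have hse := PySem.List.map_snd_enumerate (pvKids facets name) 0
              obtain ⟨ik, hik, hn2⟩ := List.mem_map.mp h2
              rw [← hse]
              exact List.mem_map.mpr ⟨ik, hik, hn2⟩
            exact Or.inr ⟨name, by simp, hkmem⟩
          · exact mono n (hinv n (Or.inr (by simp [h2]))))
      (by
        intro q hq
        rcases List.mem_append.mp hq with h | h
        · obtain ⟨ik, hik, rfl⟩ := List.mem_map.mp h
          have hklen : 0 < (pvKids facets name).length := by
            cases hpk : pvKids facets name with
            | nil =>
              rw [hpk, PySem.List.enumerate_nil] at hik
              simp at hik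
            | cons a l => simp [hpk]
          have hfu := hfuel (m + 1, name, lead, clead) (by simp)
          rw [hp] at hfu
          have hdl : (dropKids pending name).length
              = (pendingOf facets (done ++ [name])).length := by rw [hpend']
          simp only
          omega
        · have hfu := hfuel q (by simp [h])
          rw [hp] at hfu
          have hdl : (dropKids pending name).length
              = (pendingOf facets (done ++ [name])).length := by rw [hpend']
          have hle := pendingOf_le facets done name
          omega)
    -- unfold one renderRec level and reassemble
    rw [loopB]
    simp only [hk0, dite_eq_ite] at hIH ⊢
    rw [hkids] at hIH ⊢
    rw [hpend'] at hIH ⊢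
    rw [hIH]
    have hrender : renderRec facets (m + 1) name lead clead
        = ["// " ++ lead ++ name] ++ (PySem.List.enumerate (pvKids facets name)).flatMap
            (fun ik => renderRec facets m ik.2
              (clead ++ (if ik.1 == ((pvKids facets name).length : Int) - 1 then "╰╴" else "├╴"))
              (clead ++ (if ik.1 == ((pvKids facets name).length : Int) - 1 then "  " else "│ "))) := by
      simp only [renderRec]
      rw [PySem.List.foldl_append_eq_flatMap]
    simp only [List.flatMap_cons, hrender, List.flatMap_append, List.flatMap_map]
    simp [List.map_append, List.append_assoc, List.flatMap_map, Function.comp_def]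

-- ===== VERDICT (by name: the statement is the Claim_ definition above) =====
theorem build_inheritance_tree_spec : Claim_equal_build_inheritance_tree := by
  intro facets _ hpre
  obtain ⟨_, ⟨f0, hf0, hf0b⟩, hnd, hdisj⟩ := hpre
  unfold Spec_build_inheritance_tree
  obtain ⟨r, hr⟩ : ∃ r, facets.reverse.find? (fun f => pvBase f == "") = some r := by
    cases hx : facets.reverse.find? (fun f => pvBase f == "") with
    | some r => exact ⟨r, rfl⟩
    | none =>
      rw [List.find?_eq_none] at hx
      exact absurd (by simp [hf0b]) (hx f0 (by simpa using hf0))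
  have hrmem : r ∈ facets := by
    have := List.mem_of_find?_eq_some hr
    simpa using this
  have hrb : pvBase r = "" := by
    have := List.find?_some hr
    simpa using this
  have hroot := root_eq_reverse_find facets PySem.Dict.empty none
  rw [hr] at hroot
  have hrootB := rootB_eq_reverse_find facets none
  rw [hr] at hrootB
  have H : ∀ k, ((facets.foldl buildTreeStep (PySem.Dict.empty, none)).1).getD k []
      = pvKids facets k := by
    intro k
    rw [tree_getD_eq_pvKids, PySem.Dict.getD_empty]
    simp
  -- A's side
  simp only [build_inheritance_tree, hroot, Option.or]
  rw [renderA_eq_renderRec_root facets _ H]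
  -- B's side
  simp only [build_inheritance_tree_alt, hrootB, Option.elim]
  have hpend0 : facets.filter (fun f => pvBase f ≠ "") = pendingOf facets [] := by
    simp [pendingOf]
  have hrnotbased : ¬ pvName r ∈ basedNames facets := by
    intro hmem
    obtain ⟨g, hg, hgn⟩ := List.mem_map.mp hmem
    rw [List.mem_filter] at hg
    exact hdisj g hg.1 (by simpa using hg.2) r hrmem hrb hgn
  have hb := bridge facets hnd (pendingOf facets [])
    [(pvName r, "", "")] [] []
    [(facets.length + 1, pvName r, "", "")]
    rfl (by simp) (by simp) (by simp)
    (by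
      intro n hn
      rcases hn with h | h
      · simp at h
      · have : n = pvName r := by simpa using h
        subst this
        exact Or.inl hrnotbased)
    (by
      intro q hq
      have : q = (facets.length + 1, pvName r, "", "") := by simpa using hq
      subst this
      simp only [pendingOf]
      have := List.length_filter_le (fun f => pvBase f ≠ "" && !(List.contains [] (pvBase f))) facets
      omega)
  rw [hpend0, hb]
  simp only [List.flatMap_cons, List.flatMap_nil, List.append_nil, List.nil_append]
  rw [join_empty_eq_joinLines]
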